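-- pv_equiv track=rewrite | github.com/ma-wolpers/blattwerk | app/core/blatt_validator.py | _extract_validation_content_and_base_line
-- ===== SOURCE A (Python) =====
-- def _extract_validation_content_and_base_line(markdown_text):
--     """Return validator content and its 1-based base line in the full document."""
--     lines = (markdown_text or "").splitlines(keepends=True)
--     content_start_line = 1
--     content_raw = markdown_text or ""
--
--     if lines and lines[0].strip() == "---":
--         for line_index in range(1, len(lines)):
--             if lines[line_index].strip() == "---":
--                 content_start_line = line_index + 2
--                 content_raw = "".join(lines[line_index + 1 :])
--                 break
--
--     content_for_validation = content_raw.strip()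
--     if not content_for_validation:
--         return "", max(1, content_start_line)
--
--     leading_removed_text = content_raw[: content_raw.find(content_for_validation)]
--     leading_removed_lines = leading_removed_text.count("\n")
--     base_line = content_start_line + leading_removed_lines
--     return content_for_validation, max(1, base_line)
-- ===== SOURCE B (Python) =====
-- def _extract_validation_content_and_base_line(markdown_text):
--     """Return validator content and its 1-based base line in the full document."""
--     text = markdown_text or ""
--
--     def split_first_line(s):
--         for k in range(len(s)):
--             if s[k] == "\n":
--                 return s[:k], s[k + 1:]
--             if s[k] == "\r":
--                 if s[k + 1:k + 2] == "\n":
--                     return s[:k], s[k + 2:]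
--                 return s[:k], s[k + 1:]
--         return s, ""
--
--     start_text = text
--     first_line = 1
--     if text:
--         head, rest = split_first_line(text)
--         if head.strip() == "---":
--             line_no = 2
--             while rest:
--                 line, rest2 = split_first_line(rest)
--                 if line.strip() == "---":
--                     start_text = rest2
--                     first_line = line_no + 1
--                     break
--                 rest = rest2
--                 line_no += 1
--
--     content = start_text.strip()
--     if not content:
--         return "", max(1, first_line)
--
--     base = first_line
--     for ch in start_text:
--         if not ch.isspace():
--             break
--         if ch == "\n":
--             base += 1
--     return content, max(1, base)
-- ===== Notes on version B (the rewrite author's own statement) =====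
-- stated objective: alternative
-- what changed: B never builds the keepends line list: it peels terminator-free lines off the raw string one at a time with a fused scan that numbers lines while hunting the closing front-matter delimiter, and computes the base line by a per-character walk over the leading whitespace, replacing A's splitlines/join plus find/count string arithmetic.
import Mathlib
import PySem

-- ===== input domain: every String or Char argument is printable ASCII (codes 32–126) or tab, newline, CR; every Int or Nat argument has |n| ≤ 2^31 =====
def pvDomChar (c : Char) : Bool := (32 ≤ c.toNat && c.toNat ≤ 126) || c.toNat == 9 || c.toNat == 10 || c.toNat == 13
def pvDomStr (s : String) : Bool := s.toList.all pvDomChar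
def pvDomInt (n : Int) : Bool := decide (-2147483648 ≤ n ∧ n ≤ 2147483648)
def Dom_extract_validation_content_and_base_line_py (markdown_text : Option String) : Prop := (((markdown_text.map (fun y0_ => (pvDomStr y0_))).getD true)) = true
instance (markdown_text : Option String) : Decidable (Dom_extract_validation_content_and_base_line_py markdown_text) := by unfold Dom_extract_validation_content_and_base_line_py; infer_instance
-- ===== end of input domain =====

-- B never builds the keepends line list: it peels lines off the raw string one at a time
-- (terminator discarded), fuses the closing-'---' search with the line numbering, and gets the
-- base line by a per-character scan over the leading whitespace (objective: simpler decomposition).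

-- ===== PORT A =====

-- str.splitlines(keepends=True) (exact on the domain, where the only
-- line-break characters are '\n', '\r' and the pair '\r\n').
def takeLine : List Char → List Char × List Char
  | [] => ([], [])
  | c :: r =>
    if c = '\n' then (['\n'], r)
    else if c = '\r' then
      if r.head? = some '\n' then (['\r', '\n'], r.tail)
      else (['\r'], r)
    else
      let p := takeLine r
      (c :: p.1, p.2)

theorem takeLine_eq_cons (c : Char) (r : List Char) (hn : c ≠ '\n') (hr : c ≠ '\r') :
    takeLine (c :: r) = (c :: (takeLine r).1, (takeLine r).2) := by
  rw [takeLine, if_neg hn, if_neg hr]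

-- needed by linesKE for termination (cited by name in decreasing_by)
theorem takeLine_spec : ∀ (l : List Char), l ≠ [] →
    (takeLine l).1 ++ (takeLine l).2 = l ∧ (takeLine l).1 ≠ [] ∧
    '\n' ∉ (takeLine l).1.dropLast ∧ (takeLine l).2.length < l.length := by
  intro l
  induction l with
  | nil => intro h; exact absurd rfl h
  | cons c r ih =>
    intro _
    by_cases hn : c = '\n'
    · subst hn; simp [takeLine]
    · by_cases hr : c = '\r'
      · subst hr
        by_cases hh : r.head? = some '\n'
        · match r with
          | a :: t =>
            simp only [List.head?_cons, Option.some.injEq] at hh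
            subst hh
            simp [takeLine]
        · simp [takeLine, hh]
      · match r with
        | [] =>
          rw [takeLine_eq_cons c [] hn hr]
          simp [takeLine]
        | c2 :: r2 =>
          obtain ⟨hap, hne, hnl, hlt⟩ := ih (by simp)
          rw [takeLine_eq_cons c (c2 :: r2) hn hr]
          refine ⟨by simpa using hap, by simp, ?_, by simpa using Nat.lt_succ_of_lt hlt⟩
          simp only
          rw [List.dropLast_cons_of_ne_nil hne]
          simp only [List.mem_cons, not_or]
          exact ⟨fun h => hn h.symm, hnl⟩

def linesKE : List Char → List (List Char)
  | [] => []
  | c :: r => (takeLine (c :: r)).1 :: linesKE (takeLine (c :: r)).2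
  termination_by l => l.length
  decreasing_by exact (takeLine_spec (c :: r) (by simp)).2.2.2

-- A's front-matter closing-line scan
-- ('for line_index in range(1, len(lines)): if lines[line_index].strip() == "---": … break')
def findClose : List (List Char) → Nat → Option Nat
  | [], _ => none
  | l :: rest, i => if PySem.Chars.strip l = ['-', '-', '-'] then some i else findClose rest (i + 1)

def extract_validation_content_and_base_line_py (markdown_text : Option String) : String × Int :=
  let text := (markdown_text.getD "").toList
  let lines := linesKE text
  let st : Int × List Char :=
    match lines with
    | [] => (1, text)
    | l0 :: rest =>
      if PySem.Chars.strip l0 = ['-', '-', '-'] then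
        match findClose rest 1 with
        | some i => ((i : Int) + 2, PySem.Chars.join [] (lines.drop (i + 1)))
        | none => (1, text)
      else (1, text)
  let content_for_validation := PySem.Chars.strip st.2
  if content_for_validation = [] then ("", max 1 st.1)
  else
    let lead := PySem.List.slice st.2 none (some (PySem.Chars.find st.2 content_for_validation))
    (String.mk content_for_validation,
      max 1 (st.1 + (PySem.Chars.count lead ['\n'] : Int)))

-- ===== PORT B =====

-- Source B's split_first_line: first line WITHOUT its terminator, and the text after it
def splitFirst : List Char → List Char × List Char
  | [] => ([], [])
  | c :: r =>
    if c = '\n' then ([], r)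
    else if c = '\r' then
      if r.head? = some '\n' then ([], r.tail)
      else ([], r)
    else
      let p := splitFirst r
      (c :: p.1, p.2)

-- needed by scanClose for termination (cited by name in decreasing_by)
theorem splitFirst_snd_len : ∀ (l : List Char), l ≠ [] → (splitFirst l).2.length < l.length := by
  intro l
  induction l with
  | nil => intro h; exact absurd rfl h
  | cons c r ih =>
    intro _
    by_cases hn : c = '\n'
    · subst hn; simp [splitFirst]
    · by_cases hr : c = '\r'
      · subst hr
        rw [splitFirst]
        by_cases hh : r.head? = some '\n'
        · match r with
          | a :: t => simp [hh]
        · simp [hh]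
      · rw [splitFirst, if_neg hn, if_neg hr]
        match r with
        | [] => simp [splitFirst]
        | c2 :: r2 => simpa using Nat.lt_succ_of_lt (ih (by simp))

-- Source B's while loop: peel lines off `s` (whose first line is line number k),
-- returning the text after the first '---' line and the 1-based line after it
def scanClose : List Char → Int → Option (List Char × Int)
  | [], _ => none
  | c :: r, k =>
    let p := splitFirst (c :: r)
    if PySem.Chars.strip p.1 = ['-', '-', '-'] then some (p.2, k + 1)
    else scanClose p.2 (k + 1)
  termination_by l => l.length
  decreasing_by exact splitFirst_snd_len (c :: r) (by simp)

-- Source B's final loop: walk the leading whitespace characters, counting the newlines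
def leadBase : List Char → Int → Int
  | [], n => n
  | c :: r, n =>
    if PySem.Chars.isspace c then leadBase r (if c = '\n' then n + 1 else n)
    else n

def extract_validation_content_and_base_line_py_alt (markdown_text : Option String) : String × Int :=
  let text := (markdown_text.getD "").toList
  let sf : List Char × Int :=
    match text with
    | [] => (text, 1)
    | c :: r =>
      let p := splitFirst (c :: r)
      if PySem.Chars.strip p.1 = ['-', '-', '-'] then
        match scanClose p.2 2 with
        | some q => q
        | none => (text, 1)
      else (text, 1)
  let content := PySem.Chars.strip sf.1
  if content = [] then ("", max 1 sf.2)
  else (String.mk content, max 1 (leadBase sf.1 sf.2))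

-- ===== PRECONDITION & SPEC =====
def Spec_extract_validation_content_and_base_line_py (markdown_text : Option String) (out : String × Int) : Prop := out = extract_validation_content_and_base_line_py_alt markdown_text
instance (markdown_text : Option String) (out : String × Int) : Decidable (Spec_extract_validation_content_and_base_line_py markdown_text out) := by unfold Spec_extract_validation_content_and_base_line_py; infer_instance

-- ===== CLAIM (what is proved, stated in full; the proofs are below) =====
def Claim_equal_extract_validation_content_and_base_line_py : Prop := ∀ (markdown_text : Option String), Dom_extract_validation_content_and_base_line_py markdown_text → Spec_extract_validation_content_and_base_line_py markdown_text (extract_validation_content_and_base_line_py markdown_text)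

-- ===== LEMMAS AND PROOFS =====

theorem join_nil_flatten (parts : List (List Char)) : PySem.Chars.join [] parts = parts.flatten := by
  induction parts with
  | nil => rfl
  | cons a t ih =>
    match t with
    | [] => simp [PySem.Chars.join, List.intercalate]
    | b :: t2 =>
      simp only [PySem.Chars.join, List.intercalate] at ih ⊢
      simp [List.intersperse, List.flatten] at ih ⊢
      exact ih

theorem flatten_linesKE (cs : List Char) : (linesKE cs).flatten = cs := by
  induction cs using linesKE.induct with
  | case1 => simp [linesKE]
  | case2 c r ih =>
    rw [linesKE]
    simp only [List.flatten_cons, ih]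
    exact (takeLine_spec (c :: r) (by simp)).1

theorem count_go_singleton (c : Char) :
    ∀ (fuel : Nat) (l : List Char) (acc : Nat), l.length ≤ fuel →
      PySem.Chars.count.go [c] fuel l acc = acc + l.count c := by
  intro fuel
  induction fuel with
  | zero =>
    intro l acc h
    have : l = [] := List.length_eq_zero_iff.mp (Nat.le_zero.mp h)
    subst this; rfl
  | succ n ih =>
    intro l acc h
    match l with
    | [] => rfl
    | a :: t =>
      by_cases hc : a = c
      · subst hc
        have hp : ([a] : List Char).isPrefixOf (a :: t) = true := by simp [List.isPrefixOf]
        rw [PySem.Chars.count.go, if_pos hp]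
        have hd : List.drop ([a] : List Char).length (a :: t) = t := by simp
        rw [hd]
        simp only [List.length_cons] at h
        rw [ih t (acc + 1) (by omega)]
        have hcc : List.count a (a :: t) = List.count a t + 1 := by
          rw [List.count_cons]
          simp
        omega
      · have : ([c] : List Char).isPrefixOf (a :: t) = false := by
          simp [List.isPrefixOf]; exact fun hh => hc hh.symm
        rw [PySem.Chars.count.go, if_neg (by simp [this])]
        rw [ih t acc (by simpa using Nat.le_of_succ_le_succ h)]
        have hcc : List.count c (a :: t) = List.count c t := by
          rw [List.count_cons]
          simp
          exact hc
        omega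

theorem count_singleton (l : List Char) (c : Char) :
    PySem.Chars.count l [c] = l.count c := by
  rw [PySem.Chars.count]
  simp only [List.isEmpty_cons, if_false, Bool.false_eq_true]
  simpa using count_go_singleton c l.length l 0 le_rfl

theorem strip_prefix_dropWhile (l : List Char) :
    PySem.Chars.strip l <+: List.dropWhile PySem.Chars.isspace l := by
  unfold PySem.Chars.strip PySem.Chars.rstrip PySem.Chars.lstrip
  rw [← List.reverse_suffix]
  simpa using List.dropWhile_suffix (p := PySem.Chars.isspace)
    (l := (List.dropWhile PySem.Chars.isspace l).reverse)

theorem dropWhile_eq_cons_head {p : Char → Bool} {l : List Char} {a : Char} {t : List Char}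
    (h : l.dropWhile p = a :: t) : p a = false := by
  have hw := List.head_dropWhile_not p (l := l) (by simp [h])
  simp only [h] at hw
  simpa using hw

-- A's content_raw.find(content_raw.strip()) is the length of the leading whitespace
theorem find_strip_eq (raw : List Char) (h : PySem.Chars.strip raw ≠ []) :
    PySem.Chars.find raw (PySem.Chars.strip raw) =
      ((raw.takeWhile PySem.Chars.isspace).length : Int) := by
  set W := raw.takeWhile PySem.Chars.isspace with hW
  set sub := PySem.Chars.strip raw with hsub
  have hdropW : raw.drop W.length = raw.dropWhile PySem.Chars.isspace := by
    conv_lhs => rw [← List.takeWhile_append_dropWhile (p := PySem.Chars.isspace) (l := raw)]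
    rw [← hW, List.drop_left]
  have hpre : sub <+: raw.drop W.length := by rw [hdropW]; exact strip_prefix_dropWhile raw
  have hinfix : sub <:+: raw := hpre.isInfix.trans (List.drop_suffix _ _).isInfix
  have hnonneg : 0 ≤ PySem.Chars.find raw sub := (PySem.Chars.find_nonneg_iff raw sub).mpr hinfix
  obtain ⟨hfp, hmin⟩ := PySem.Chars.find_spec (s := raw) (sub := sub) hnonneg
  obtain ⟨s0, stl, hs0⟩ := List.exists_cons_of_ne_nil h
  have hs0ns : PySem.Chars.isspace s0 = false := by
    obtain ⟨t, ht⟩ := hpre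
    rw [hdropW] at ht
    apply dropWhile_eq_cons_head (l := raw) (t := stl ++ t)
    rw [← ht, hs0]
    simp
  have hle : (PySem.Chars.find raw sub).toNat ≤ W.length := by
    by_contra hgt
    exact (hmin W.length (by omega)) hpre
  have hge : W.length ≤ (PySem.Chars.find raw sub).toNat := by
    by_contra hlt
    push_neg at hlt
    obtain ⟨t, ht⟩ := hfp
    have hWpre : W <+: raw := List.takeWhile_prefix _
    obtain ⟨rest, hrest⟩ := hWpre
    set k := (PySem.Chars.find raw sub).toNat with hk
    have hkle : k ≤ W.length := le_of_lt hlt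
    have hi : raw.drop k = W.drop k ++ rest := by
      conv_lhs => rw [← hrest]
      rw [List.drop_append_of_le_length hkle]
    rw [hi] at ht
    obtain ⟨w0, wtl, hWd⟩ : ∃ w0 wtl, W.drop k = w0 :: wtl := by
      refine List.exists_cons_of_ne_nil ?_
      intro hc
      have := List.length_drop (i := k) (l := W)
      rw [hc] at this
      simp at this
      omega
    have hw0 : PySem.Chars.isspace w0 = true := by
      have : w0 ∈ W := List.mem_of_mem_drop (by rw [hWd]; simp)
      exact List.mem_takeWhile_imp this
    rw [hWd, hs0] at ht
    simp only [List.cons_append, List.cons.injEq] at ht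
    rw [← ht.1] at hw0
    rw [hw0] at hs0ns
    exact absurd hs0ns (by simp)
  have : (PySem.Chars.find raw sub).toNat = W.length := le_antisymm hle hge
  omega

-- stripping ignores a trailing all-whitespace suffix (the discarded line terminator)
theorem strip_append_space (x t : List Char) (ht : ∀ c ∈ t, PySem.Chars.isspace c = true) :
    PySem.Chars.strip (x ++ t) = PySem.Chars.strip x := by
  unfold PySem.Chars.strip PySem.Chars.rstrip PySem.Chars.lstrip
  have htnil : t.dropWhile PySem.Chars.isspace = [] := List.dropWhile_eq_nil_iff.mpr ht
  have htrnil : t.reverse.dropWhile PySem.Chars.isspace = [] :=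
    List.dropWhile_eq_nil_iff.mpr (by intro c hc; exact ht c (List.mem_reverse.mp hc))
  rw [List.dropWhile_append]
  by_cases hx : (x.dropWhile PySem.Chars.isspace).isEmpty
  · rw [if_pos hx, htnil]
    rw [List.isEmpty_iff] at hx
    rw [hx]
  · rw [if_neg hx, List.reverse_append, List.dropWhile_append, if_pos (by rw [htrnil]; rfl)]

-- the terminator-free first line plus some whitespace is the keepends first line
theorem splitFirst_decomp : ∀ (s : List Char), ∃ t : List Char,
    (takeLine s).1 = (splitFirst s).1 ++ t ∧ (∀ c ∈ t, PySem.Chars.isspace c = true) ∧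
    (splitFirst s).2 = (takeLine s).2 := by
  intro s
  induction s with
  | nil => exact ⟨[], rfl, by simp, rfl⟩
  | cons c r ih =>
    by_cases hn : c = '\n'
    · subst hn
      have hT : takeLine ('\n' :: r) = (['\n'], r) := by rw [takeLine]; simp
      have hS : splitFirst ('\n' :: r) = ([], r) := by rw [splitFirst]; simp
      refine ⟨['\n'], by rw [hT, hS]; rfl, ?_, by rw [hT, hS]⟩
      intro x hx; simp at hx; subst hx; rfl
    · by_cases hr : c = '\r'
      · subst hr
        by_cases hh : r.head? = some '\n'
        · have hT : takeLine ('\r' :: r) = (['\r', '\n'], r.tail) := by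
            rw [takeLine]; simp [hh]
          have hS : splitFirst ('\r' :: r) = ([], r.tail) := by
            rw [splitFirst]; simp [hh]
          refine ⟨['\r', '\n'], by rw [hT, hS]; rfl, ?_, by rw [hT, hS]⟩
          intro x hx; simp at hx; rcases hx with h | h <;> subst h <;> rfl
        · have hT : takeLine ('\r' :: r) = (['\r'], r) := by
            rw [takeLine]; simp [hh]
          have hS : splitFirst ('\r' :: r) = ([], r) := by
            rw [splitFirst]; simp [hh]
          refine ⟨['\r'], by rw [hT, hS]; rfl, ?_, by rw [hT, hS]⟩
          intro x hx; simp at hx; subst hx; rfl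
      · obtain ⟨t, h1, h2, h3⟩ := ih
        rw [takeLine_eq_cons c r hn hr, splitFirst, if_neg hn, if_neg hr]
        exact ⟨t, by simp [h1], h2, h3⟩

-- the two line-splitters agree: same remainder, and stripping the line gives the same result
theorem splitFirst_takeLine (s : List Char) :
    (splitFirst s).2 = (takeLine s).2 ∧
    PySem.Chars.strip (splitFirst s).1 = PySem.Chars.strip (takeLine s).1 := by
  obtain ⟨t, h1, h2, h3⟩ := splitFirst_decomp s
  exact ⟨h3, by rw [h1, strip_append_space _ t h2]⟩

-- findClose only returns indices ≥ its starting index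
theorem findClose_ge : ∀ (L : List (List Char)) (i j : Nat), findClose L i = some j → i ≤ j := by
  intro L
  induction L with
  | nil => intro i j h; exact absurd h (by simp [findClose])
  | cons l rest ih =>
    intro i j h
    rw [findClose] at h
    split_ifs at h with hg
    · injection h with h
      omega
    · have := ih (i + 1) j h
      omega

-- B's fused scan equals A's findClose over the keepends line list
theorem scanClose_eq : ∀ (s : List Char) (i : Nat),
    scanClose s ((i : Int) + 1) =
      (findClose (linesKE s) i).map
        (fun j => (((linesKE s).drop (j + 1 - i)).flatten, (j : Int) + 2)) := by
  intro s
  induction s using linesKE.induct with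
  | case1 => intro i; simp [scanClose, linesKE, findClose]
  | case2 c r ih =>
    intro i
    rw [scanClose, linesKE]
    have hsnd := (splitFirst_takeLine (c :: r)).1
    have hstr := (splitFirst_takeLine (c :: r)).2
    rw [findClose]
    by_cases hg : PySem.Chars.strip (takeLine (c :: r)).1 = ['-', '-', '-']
    · rw [if_pos (hstr.trans hg), if_pos hg]
      simp only [Option.map_some]
      have : i + 1 - i = 1 := by omega
      rw [this, List.drop_one, List.tail_cons, flatten_linesKE, hsnd]
      have h12 : (i : Int) + 1 + 1 = (i : Int) + 2 := by ring
      rw [h12]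
    · rw [if_neg (fun hc => hg (hstr ▸ hc)), if_neg hg, hsnd]
      have h2 : ((i : Int) + 1) + 1 = ((i + 1 : Nat) : Int) + 1 := by push_cast; ring
      rw [h2, ih (i + 1)]
      cases hF : findClose (linesKE (takeLine (c :: r)).2) (i + 1) with
      | none => simp
      | some j =>
        have hij : i + 1 ≤ j := findClose_ge _ _ _ hF
        simp only [Option.map_some]
        have h3 : j + 1 - i = (j + 1 - (i + 1)) + 1 := by omega
        rw [h3, List.drop_succ_cons]

-- B's per-character loop counts the newlines in the leading whitespace
theorem leadBase_eq : ∀ (s : List Char) (n : Int),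
    leadBase s n = n + (((s.takeWhile PySem.Chars.isspace).count '\n' : Nat) : Int) := by
  intro s
  induction s with
  | nil => intro n; simp [leadBase]
  | cons c r ih =>
    intro n
    rw [leadBase]
    by_cases hs : PySem.Chars.isspace c
    · rw [if_pos hs, List.takeWhile_cons_of_pos (by simpa using hs), ih, List.count_cons]
      by_cases hc : c = '\n'
      · subst hc; simp; ring
      · rw [if_neg hc]
        simp [hc]
    · rw [if_neg hs, List.takeWhile_cons_of_neg (by simpa using hs)]
      simp

-- shared tail computation: A's find/count string arithmetic equals B's leading scan
theorem tail_eq (raw : List Char) (n : Int) :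
    (if PySem.Chars.strip raw = [] then (("" : String), max 1 n)
     else (String.mk (PySem.Chars.strip raw),
       max 1 (n + (PySem.Chars.count
         (PySem.List.slice raw none (some (PySem.Chars.find raw (PySem.Chars.strip raw)))) ['\n'] : Int)))) =
    (if PySem.Chars.strip raw = [] then (("" : String), max 1 n)
     else (String.mk (PySem.Chars.strip raw), max 1 (leadBase raw n))) := by
  by_cases hc : PySem.Chars.strip raw = []
  · simp [hc]
  · simp only [if_neg hc]
    rw [find_strip_eq _ hc, PySem.List.slice_to_natCast]
    have : raw.take (raw.takeWhile PySem.Chars.isspace).length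
        = raw.takeWhile PySem.Chars.isspace :=
      (List.prefix_iff_eq_take.mp (List.takeWhile_prefix _)).symm
    rw [this, count_singleton, leadBase_eq raw n]

-- ===== VERDICT (by name: the statement is the Claim_ definition above) =====
theorem extract_validation_content_and_base_line_py_spec : Claim_equal_extract_validation_content_and_base_line_py := by
  intro markdown_text _
  unfold Spec_extract_validation_content_and_base_line_py
  unfold extract_validation_content_and_base_line_py extract_validation_content_and_base_line_py_alt
  simp only [join_nil_flatten]
  set text := (markdown_text.getD "").toList with htext
  match htx : text with
  | [] =>
    simp [linesKE, PySem.Chars.strip, PySem.Chars.rstrip, PySem.Chars.lstrip]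
  | c :: r =>
    simp only [linesKE]
    have hsnd := (splitFirst_takeLine (c :: r)).1
    have hstr := (splitFirst_takeLine (c :: r)).2
    by_cases hg : PySem.Chars.strip (takeLine (c :: r)).1 = ['-', '-', '-']
    · simp only [if_pos hg, if_pos (hstr.trans hg), hsnd]
      have h2 : (2 : Int) = ((1 : Nat) : Int) + 1 := by norm_num
      rw [h2, scanClose_eq (takeLine (c :: r)).2 1]
      cases hF : findClose (linesKE (takeLine (c :: r)).2) 1 with
      | none =>
        simp only [Option.map_none]
        exact tail_eq (c :: r) 1
      | some j =>
        have hij : 1 ≤ j := findClose_ge _ _ _ hF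
        simp only [Option.map_some]
        have h3 : j + 1 - 1 = j := by omega
        have h4 : List.drop (j + 1) ((takeLine (c :: r)).1 :: linesKE (takeLine (c :: r)).2)
            = List.drop j (linesKE (takeLine (c :: r)).2) := List.drop_succ_cons
        rw [h3, h4]
        exact tail_eq _ ((j : Int) + 2)
    · simp only [if_neg hg, if_neg (fun hc2 => hg (hstr ▸ hc2))]
      exact tail_eq (c :: r) 1
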